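-- pv_equiv track=rewrite | github.com/sciatti/AoC-2024 | 6/puzzle2/sln.py | calculate_escape_grid
-- ===== SOURCE A (Python) =====
-- dir_list = [
--     (-1, 0),    # up
--     (0, 1),     # right
--     (1, 0),     # down
--     (0, -1)     # left
-- ]
--
-- def calculate_escape_grid(input_grid):# -> list[list[list[bool, bool, bool, bool]]]:
--     escape_grid = []
--     for row in input_grid:
--         escape_grid.append([])
--         for _cell in row:
--             escape_grid[-1].append(['Y', 'Y', 'Y', 'Y'])
--
--     # iterate through each direciton and determine if a point can exit given a specific direction
--     for dir_idx, dir in enumerate(dir_list):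
--         search_vert = True
--         # searching the up direction, start at the top and move down
--         range_args = { 'i': (0, len(input_grid), 1), 'j': (0, len(input_grid[0]), 1) }
--         if dir == dir_list[1]:
--             # searching the right direction, start on the right and move left
--             range_args = { 'i': (0, len(input_grid), 1), 'j': (len(input_grid[0]) - 1, -1, -1) }
--             search_vert = False
--         elif dir == dir_list[2]:
--             # searching the down direction, start on the bottom and move up
--             range_args = { 'i': (len(input_grid) - 1, -1, -1), 'j': (0, len(input_grid[0]), 1) }
--         elif dir == dir_list[3]:
--             # searching the left direction, start on the left and move right
--             range_args = { 'i': (len(input_grid) - 1, -1, -1), 'j': (0, len(input_grid[0]), 1) }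
--             search_vert = False
--
--         for idx_1 in range(*range_args['j' if search_vert else 'i']):
--             has_wall = False
--             for idx_2 in range(*range_args['i' if search_vert else 'j']):
--                 i, j = (idx_2, idx_1) if search_vert else (idx_1, idx_2)
--                 curr_space = input_grid[i][j]
--                 # if current space is a wall
--                 if curr_space == '#':
--                     # mark escape_grid as False as this is a wall
--                     escape_grid[i][j][dir_idx] = 'N'
--                     # we have encountered a wall, so all other paths can not lead out on the row/col
--                     has_wall = True
--                 # otherwise this is a normal space
--                 else:
--                     # if we are on a normal space and have seen a wall in this row/col...
--                     if has_wall: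
--                         escape_grid[i][j][dir_idx] = 'N'
--                     # since spaces are automatically counted as True nothing to do
--     return escape_grid
-- ===== SOURCE B (Python) =====
-- dir_list = [
--     (-1, 0),    # up
--     (0, 1),     # right
--     (1, 0),     # down
--     (0, -1)     # left
-- ]
--
-- def calculate_escape_grid(input_grid):
--     # A cell can escape in a direction iff no wall ('#') lies on the ray from the
--     # cell (inclusive) to the grid edge: start from an all-'Y' grid and rescan the
--     # ray of every scanned cell directly, marking 'N' where it hits a wall.
--     height = len(input_grid)
--     width = len(input_grid[0])
--
--     def blocked(i, j, di, dj):
--         if di < 0: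
--             steps = i + 1
--         elif di > 0:
--             steps = height - i
--         elif dj < 0:
--             steps = j + 1
--         else:
--             steps = width - j
--         return any(input_grid[i + k * di][j + k * dj] == '#' for k in range(steps))
--
--     escape_grid = [[['Y', 'Y', 'Y', 'Y'] for _cell in row] for row in input_grid]
--     for i in range(height):
--         for j in range(width):
--             for d, (di, dj) in enumerate(dir_list):
--                 if blocked(i, j, di, dj):
--                     escape_grid[i][j][d] = 'N'
--     return escape_grid
-- ===== Notes on version B (the rewrite author's own statement) =====
-- stated objective: alternative
-- what changed: Replaces the four stateful has_wall accumulator sweeps (with the range_args direction table) by a per-cell ray rescan: starting from the all-'Y' grid, every scanned cell independently rescans its ray to the grid edge in each of the four directions and is marked 'N' where the ray hits a wall; no accumulator state. Pre_ excludes only the inputs where both programs raise IndexError (empty grid, or a row shorter than row 0).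
import Mathlib
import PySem

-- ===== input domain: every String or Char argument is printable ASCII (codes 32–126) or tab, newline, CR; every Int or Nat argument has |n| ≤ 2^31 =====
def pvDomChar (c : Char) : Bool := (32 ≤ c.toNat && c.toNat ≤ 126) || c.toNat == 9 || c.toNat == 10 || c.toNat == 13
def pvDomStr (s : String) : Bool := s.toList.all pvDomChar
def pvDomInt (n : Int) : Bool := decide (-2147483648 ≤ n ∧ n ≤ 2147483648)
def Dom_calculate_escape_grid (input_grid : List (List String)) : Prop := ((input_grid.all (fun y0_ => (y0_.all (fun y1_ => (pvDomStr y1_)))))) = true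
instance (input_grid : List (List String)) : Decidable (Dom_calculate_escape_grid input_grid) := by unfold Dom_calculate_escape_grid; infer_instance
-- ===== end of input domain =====

-- B replaces A's four has_wall accumulator sweeps by an independent per-cell ray rescan
-- over the scanned height×width rectangle (alternative algorithm, no accumulator state);
-- equal return value on every input Pre_ admits.

-- ===== PORT A =====
def pvDirList : List (Int × Int) := [(-1, 0), (0, 1), (1, 0), (0, -1)]

-- escape_grid[i][j][dir_idx] = v  (read eg[i] and eg[i][j], set the slot, write back;
-- all indices the loops produce are nonnegative, and Pre_ keeps the writes in range)
def pvSet3 (eg : List (List (List String))) (i j d : Int) (v : String) :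
    List (List (List String)) :=
  PySem.List.pySetD eg i
    (PySem.List.pySetD (PySem.List.pyGetD eg i []) j
      (PySem.List.pySetD (PySem.List.pyGetD (PySem.List.pyGetD eg i []) j []) d v))

-- the two initialization loops of A
def pvInitA (input_grid : List (List String)) : List (List (List String)) :=
  input_grid.foldl (fun eg row =>
    let eg := eg ++ [[]]
    row.foldl (fun eg _cell =>
      eg.dropLast ++ [eg.getLastD [] ++ [["Y", "Y", "Y", "Y"]]]) eg) []

-- the body of A's outer `for dir_idx, dir in enumerate(dir_list)` loop;
-- range_args {'i': …, 'j': …} is modeled as the pair (ri, rj) of (start, stop, step) triples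
def pvPass (input_grid : List (List String)) (eg : List (List (List String)))
    (de : Int × (Int × Int)) : List (List (List String)) :=
  let dir_idx := de.1
  let dir := de.2
  let st0 : Bool × ((Int × Int × Int) × (Int × Int × Int)) :=
    (true, ((0, (input_grid.length : Int), 1),
            (0, ((PySem.List.pyGetD input_grid 0 []).length : Int), 1)))
  let st1 :=
    if dir == PySem.List.pyGetD pvDirList 1 (0, 0) then
      (false, ((0, (input_grid.length : Int), 1),
               (((PySem.List.pyGetD input_grid 0 []).length : Int) - 1, -1, -1)))
    else if dir == PySem.List.pyGetD pvDirList 2 (0, 0) then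
      (true, (((input_grid.length : Int) - 1, -1, -1),
              (0, ((PySem.List.pyGetD input_grid 0 []).length : Int), 1)))
    else if dir == PySem.List.pyGetD pvDirList 3 (0, 0) then
      (false, (((input_grid.length : Int) - 1, -1, -1),
               (0, ((PySem.List.pyGetD input_grid 0 []).length : Int), 1)))
    else st0
  let search_vert := st1.1
  let ri := st1.2.1
  let rj := st1.2.2
  let outerArgs := if search_vert then rj else ri
  let innerArgs := if search_vert then ri else rj
  (PySem.List.pyRange outerArgs.1 outerArgs.2.1 outerArgs.2.2).foldl (fun eg idx1 =>
    ((PySem.List.pyRange innerArgs.1 innerArgs.2.1 innerArgs.2.2).foldl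
      (fun (st : Bool × List (List (List String))) idx2 =>
        let has_wall := st.1
        let egc := st.2
        let ij := if search_vert then (idx2, idx1) else (idx1, idx2)
        let curr_space := PySem.List.pyGetD (PySem.List.pyGetD input_grid ij.1 []) ij.2 ""
        if curr_space == "#" then (true, pvSet3 egc ij.1 ij.2 dir_idx "N")
        else if has_wall then (has_wall, pvSet3 egc ij.1 ij.2 dir_idx "N")
        else (has_wall, egc)) (false, eg)).2) eg

def calculate_escape_grid (input_grid : List (List String)) : List (List (List String)) :=
  (PySem.List.enumerate pvDirList 0).foldl (pvPass input_grid) (pvInitA input_grid)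

-- ===== PORT B =====
def pvBlocked (input_grid : List (List String)) (height width i j di dj : Int) : Bool :=
  let steps :=
    if di < 0 then i + 1
    else if di > 0 then height - i
    else if dj < 0 then j + 1
    else width - j
  (PySem.List.pyRange 0 steps 1).any (fun k =>
    PySem.List.pyGetD (PySem.List.pyGetD input_grid (i + k * di) []) (j + k * dj) "" == "#")

def calculate_escape_grid_alt (input_grid : List (List String)) : List (List (List String)) :=
  let height : Int := input_grid.length
  let width : Int := ((PySem.List.pyGetD input_grid 0 []).length : Int)
  let escape_grid := input_grid.map (fun row => row.map (fun _cell => ["Y", "Y", "Y", "Y"]))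
  (PySem.List.pyRange 0 height 1).foldl (fun esc i =>
    (PySem.List.pyRange 0 width 1).foldl (fun esc j =>
      (PySem.List.enumerate pvDirList 0).foldl (fun esc de =>
        if pvBlocked input_grid height width i j de.2.1 de.2.2 then
          pvSet3 esc i j de.1 "N"
        else esc) esc) esc) escape_grid

-- ===== PRECONDITION & SPEC =====
-- Pre_ excludes exactly the inputs on which Python A raises IndexError: an empty grid
-- (len(input_grid[0]) fails) and grids with a row shorter than row 0 (the sweep reads
-- input_grid[i][j] for every j < len(input_grid[0])).  B raises on the same inputs.
def Pre_calculate_escape_grid (input_grid : List (List String)) : Prop :=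
  input_grid ≠ [] ∧ ∀ row ∈ input_grid, (input_grid.headD []).length ≤ row.length
instance (input_grid : List (List String)) : Decidable (Pre_calculate_escape_grid input_grid) := by
  unfold Pre_calculate_escape_grid; infer_instance
def pvWitness_calculate_escape_grid : List (List String) := [[".", "#"], [".", "."]]

def Spec_calculate_escape_grid (input_grid : List (List String)) (out : List (List (List String))) : Prop := out = calculate_escape_grid_alt input_grid
instance (input_grid : List (List String)) (out : List (List (List String))) : Decidable (Spec_calculate_escape_grid input_grid out) := by unfold Spec_calculate_escape_grid; infer_instance

-- ===== CLAIM (what is proved, stated in full; the proofs are below) =====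
def Claim_equal_calculate_escape_grid : Prop := ∀ (input_grid : List (List String)), Dom_calculate_escape_grid input_grid → Pre_calculate_escape_grid input_grid → Spec_calculate_escape_grid input_grid (calculate_escape_grid input_grid)

-- ===== LEMMAS AND PROOFS =====

def pvCell (eg : List (List (List String))) (q : Int × Int) : List String :=
  PySem.List.pyGetD (PySem.List.pyGetD eg q.1 []) q.2 []

def pvWall (G : List (List String)) (i j : Int) : Bool :=
  PySem.List.pyGetD (PySem.List.pyGetD G i []) j "" == "#"

def pvUpd (c : List String) (d : Nat) (b : Bool) : List String :=
  if b then c.set d "N" else c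

def pvStep (G : List (List String)) (d : Int) (pos : Int → Int × Int)
    (st : Bool × List (List (List String))) (t : Int) : Bool × List (List (List String)) :=
  let has_wall := st.1
  let egc := st.2
  let ij := pos t
  let curr_space := PySem.List.pyGetD (PySem.List.pyGetD G ij.1 []) ij.2 ""
  if curr_space == "#" then (true, pvSet3 egc ij.1 ij.2 d "N")
  else if has_wall then (has_wall, pvSet3 egc ij.1 ij.2 d "N")
  else (has_wall, egc)

theorem calc_unfold (G : List (List String)) :
    calculate_escape_grid G =
      pvPass G (pvPass G (pvPass G (pvPass G (pvInitA G) (0, (-1, 0))) (1, (0, 1))) (2, (1, 0))) (3, (0, -1)) := rfl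

theorem passUp_eq (G : List (List String)) (eg : List (List (List String))) :
    pvPass G eg (0, (-1, 0)) =
      (PySem.List.pyRange 0 ((PySem.List.pyGetD G 0 []).length : Int) 1).foldl (fun eg idx1 =>
        ((PySem.List.pyRange 0 (G.length : Int) 1).foldl
          (pvStep G 0 (fun t => (t, idx1))) (false, eg)).2) eg := rfl

theorem passRight_eq (G : List (List String)) (eg : List (List (List String))) :
    pvPass G eg (1, (0, 1)) =
      (PySem.List.pyRange 0 (G.length : Int) 1).foldl (fun eg idx1 =>
        ((PySem.List.pyRange (((PySem.List.pyGetD G 0 []).length : Int) - 1) (-1) (-1)).foldl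
          (pvStep G 1 (fun t => (idx1, t))) (false, eg)).2) eg := rfl

theorem passDown_eq (G : List (List String)) (eg : List (List (List String))) :
    pvPass G eg (2, (1, 0)) =
      (PySem.List.pyRange 0 ((PySem.List.pyGetD G 0 []).length : Int) 1).foldl (fun eg idx1 =>
        ((PySem.List.pyRange ((G.length : Int) - 1) (-1) (-1)).foldl
          (pvStep G 2 (fun t => (t, idx1))) (false, eg)).2) eg := rfl

theorem passLeft_eq (G : List (List String)) (eg : List (List (List String))) :
    pvPass G eg (3, (0, -1)) =
      (PySem.List.pyRange ((G.length : Int) - 1) (-1) (-1)).foldl (fun eg idx1 =>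
        ((PySem.List.pyRange 0 ((PySem.List.pyGetD G 0 []).length : Int) 1).foldl
          (pvStep G 3 (fun t => (idx1, t))) (false, eg)).2) eg := rfl
theorem pvCell_set3 (eg : List (List (List String))) (i j d : Int) (v : String)
    (hi : 0 ≤ i) (hj : 0 ≤ j) (hd : 0 ≤ d) (q : Int × Int) (hq1 : 0 ≤ q.1) (hq2 : 0 ≤ q.2) :
    pvCell (pvSet3 eg i j d v) q =
      if q = (i, j) then (pvCell eg q).set d.toNat v else pvCell eg q := by
  obtain ⟨x, y⟩ := q
  simp only [Prod.mk.injEq]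
  obtain ⟨a, rfl⟩ := Int.eq_ofNat_of_zero_le hi
  obtain ⟨b, rfl⟩ := Int.eq_ofNat_of_zero_le hj
  obtain ⟨x, rfl⟩ := Int.eq_ofNat_of_zero_le hq1
  obtain ⟨y, rfl⟩ := Int.eq_ofNat_of_zero_le hq2
  obtain ⟨c, rfl⟩ := Int.eq_ofNat_of_zero_le hd
  simp only [pvSet3, pvCell, PySem.List.pySetD_natCast, PySem.List.pyGetD_natCast,
    Int.natCast_inj, Int.toNat_natCast]
  simp only [List.getD_eq_getElem?_getD, List.getElem?_set]
  by_cases hax : a = x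
  · subst hax
    by_cases hlen : a < eg.length
    · simp only [if_pos rfl, hlen, if_pos trivial, Option.getD_some]
      by_cases hby : b = y
      · subst hby
        by_cases hlen2 : b < ((eg[a]?).getD []).length
        · simp [hlen2]
        · simp only [if_pos rfl, hlen2, if_neg, ite_self, Option.getD_none]
          have h1 : ((eg[a]?).getD ([] : List (List String)))[b]? = none :=
            List.getElem?_eq_none (by omega)
          simp [List.getElem?_set, h1, hlen2]
      · simp [List.getElem?_set, hby, (Ne.symm hby : y ≠ b)]
    · have h0 : eg[a]? = none := List.getElem?_eq_none (by omega)
      simp [hlen, h0]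
  · simp only [if_neg hax]
    split_ifs with h
    · exact absurd h.1.symm hax
    · rfl
theorem takeWhile_pyRange_asc (a b c : Int) (h1 : a ≤ c) (h2 : c < b) :
    (PySem.List.pyRange a b 1).takeWhile (fun t => decide (t ≠ c)) =
      PySem.List.pyRange a c 1 := by
  have hn : ∀ n : Nat, ∀ a, a ≤ c → c < b → (c - a).toNat = n →
      (PySem.List.pyRange a b 1).takeWhile (fun t => decide (t ≠ c)) =
        PySem.List.pyRange a c 1 := by
    intro n
    induction n with
    | zero =>
      intro a ha hb hn
      have hac : a = c := by omega
      rw [PySem.List.pyRange_one_eq_nil (show c ≤ a by omega),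
        PySem.List.pyRange_one_cons (show a < b by omega)]
      simp [hac]
    | succ n ih =>
      intro a ha hb hn
      have hac : a < c := by omega
      rw [PySem.List.pyRange_one_cons (by omega), PySem.List.pyRange_one_cons hac]
      rw [List.takeWhile_cons_of_pos (by simp; omega)]
      rw [ih (a + 1) (by omega) hb (by omega)]
  exact hn (c - a).toNat a h1 h2 rfl

theorem takeWhile_pyRange_desc (a e c : Int) (h1 : e < c) (h2 : c ≤ a) :
    (PySem.List.pyRange a e (-1)).takeWhile (fun t => decide (t ≠ c)) =
      PySem.List.pyRange a c (-1) := by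
  have hn : ∀ n : Nat, ∀ a, c ≤ a → (a - c).toNat = n →
      (PySem.List.pyRange a e (-1)).takeWhile (fun t => decide (t ≠ c)) =
        PySem.List.pyRange a c (-1) := by
    intro n
    induction n with
    | zero =>
      intro a ha hn
      have hac : a = c := by omega
      rw [PySem.List.pyRange_neg_one_eq_nil (show a ≤ c by omega),
        PySem.List.pyRange_neg_one_cons (show e < a by omega)]
      simp [hac]
    | succ n ih =>
      intro a ha hn
      have hac : c < a := by omega
      rw [PySem.List.pyRange_neg_one_cons (by omega), PySem.List.pyRange_neg_one_cons hac]
      rw [List.takeWhile_cons_of_pos (by simp; omega)]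
      rw [ih (a - 1) (by omega) (by omega)]
  exact hn (a - c).toNat a h2 rfl
theorem fold_lines_cell {eff : List (List (List String)) → Int → List (List (List String))}
    (q : Int × Int) (lq : Int) (inR : Prop) [Decidable inR] (bl : Bool) (d : Nat) :
    ∀ (L : List Int), L.Nodup →
    (∀ eg, ∀ t ∈ L, pvCell (eff eg t) q =
      if t = lq ∧ inR then pvUpd (pvCell eg q) d bl else pvCell eg q) →
    ∀ eg, pvCell (L.foldl eff eg) q =
      if lq ∈ L ∧ inR then pvUpd (pvCell eg q) d bl else pvCell eg q := by
  intro L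
  induction L with
  | nil => intro _ _ eg; simp
  | cons x L ih =>
    intro hnd hloc eg
    simp only [List.foldl_cons]
    rw [ih hnd.of_cons (fun eg t ht => hloc eg t (List.mem_cons_of_mem x ht))]
    rw [hloc eg x (List.mem_cons_self ..)]
    by_cases hx : x = lq ∧ inR
    · have hnotin : lq ∉ L := hx.1 ▸ (List.nodup_cons.mp hnd).1
      rw [if_pos hx, if_neg (fun h => hnotin h.1), if_pos ⟨by rw [← hx.1]; exact List.mem_cons_self .., hx.2⟩]
    · rw [if_neg hx]
      by_cases hL : lq ∈ L ∧ inR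
      · rw [if_pos hL, if_pos ⟨List.mem_cons_of_mem x hL.1, hL.2⟩]
      · rw [if_neg hL, if_neg]
        intro h
        rcases List.mem_cons.mp h.1 with h1 | h1
        · exact hx ⟨h1.symm, h.2⟩
        · exact hL ⟨h1, h.2⟩
theorem pvStep_eq (G : List (List String)) (d : Int) (pos : Int → Int × Int)
    (st : Bool × List (List (List String))) (t : Int) :
    pvStep G d pos st t =
      if pvWall G (pos t).1 (pos t).2 then (true, pvSet3 st.2 (pos t).1 (pos t).2 d "N")
      else if st.1 then (st.1, pvSet3 st.2 (pos t).1 (pos t).2 d "N")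
      else (st.1, st.2) := rfl

theorem sweep_cell (G : List (List String)) (d : Int) (hd : 0 ≤ d)
    (pos : Int → Int × Int) (q : Int × Int) (hq1 : 0 ≤ q.1) (hq2 : 0 ≤ q.2)
    (hinj : Function.Injective pos) :
    ∀ (ts : List Int), ts.Nodup → (∀ t ∈ ts, 0 ≤ (pos t).1 ∧ 0 ≤ (pos t).2) →
      ∀ (hw : Bool) (eg : List (List (List String))),
      pvCell ((ts.foldl (pvStep G d pos) (hw, eg)).2) q =
        if ∃ t ∈ ts, pos t = q then
          pvUpd (pvCell eg q) d.toNat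
            (hw || ((ts.takeWhile (fun t => decide (pos t ≠ q))).any
                      (fun t => pvWall G (pos t).1 (pos t).2)
                 || pvWall G q.1 q.2))
        else pvCell eg q := by
  intro ts
  induction ts with
  | nil => intro _ _ hw eg; simp
  | cons t ts ih =>
    intro hnd hpos hw eg
    have hpt := hpos t (List.mem_cons_self)
    have ih' := ih hnd.of_cons (fun u hu => hpos u (List.mem_cons_of_mem t hu))
    have hcell := fun (eg : List (List (List String))) v =>
      pvCell_set3 eg (pos t).1 (pos t).2 d v hpt.1 hpt.2 hd q hq1 hq2
    simp only [List.foldl_cons, pvStep_eq]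
    by_cases hpq : pos t = q
    · -- the scan hits q at its head
      have hnomem : ¬ ∃ u ∈ ts, pos u = q := by
        rintro ⟨u, hu, hq'⟩
        exact (List.nodup_cons.mp hnd).1 (by rwa [hinj (hq'.trans hpq.symm)] at hu)
      have hset : ∀ eg : List (List (List String)),
          pvCell (pvSet3 eg (pos t).1 (pos t).2 d "N") q = (pvCell eg q).set d.toNat "N" := by
        intro eg; rw [hcell eg "N", if_pos (by rw [← hpq])]
      have hexc : ∃ u ∈ t :: ts, pos u = q := ⟨t, List.mem_cons_self, hpq⟩
      have htw : (t :: ts).takeWhile (fun u => decide (pos u ≠ q)) = ([] : List Int) := by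
        rw [List.takeWhile_cons_of_neg]; simp [hpq]
      have hwq : pvWall G q.1 q.2 = pvWall G (pos t).1 (pos t).2 := by rw [← hpq]
      rw [if_pos hexc, htw, hwq]
      cases hb : pvWall G (pos t).1 (pos t).2
      · rw [if_neg (by simp)]
        cases hw
        · rw [if_neg (by simp)]
          rw [ih' false eg, if_neg hnomem]
          simp [pvUpd]
        · rw [if_pos rfl]
          rw [ih' true _, if_neg hnomem, hset]
          simp [pvUpd]
      · rw [if_pos rfl]
        rw [ih' true _, if_neg hnomem, hset]
        simp [pvUpd]
    · -- head does not touch q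
      have hkeep : ∀ v, pvCell (pvSet3 eg (pos t).1 (pos t).2 d v) q = pvCell eg q := by
        intro v
        rw [hcell eg v, if_neg (fun h => hpq ((by rw [h]) : pos t = q))]
      have htw : (t :: ts).takeWhile (fun u => decide (pos u ≠ q)) =
          t :: ts.takeWhile (fun u => decide (pos u ≠ q)) := by
        rw [List.takeWhile_cons_of_pos]; simp [hpq]
      have hexc : (∃ u ∈ t :: ts, pos u = q) ↔ (∃ u ∈ ts, pos u = q) := by
        constructor
        · rintro ⟨u, hu, hq'⟩
          rcases List.mem_cons.mp hu with rfl | hu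
          · exact absurd hq' hpq
          · exact ⟨u, hu, hq'⟩
        · rintro ⟨u, hu, hq'⟩; exact ⟨u, List.mem_cons_of_mem t hu, hq'⟩
      simp only [htw, List.any_cons]
      cases hb : pvWall G (pos t).1 (pos t).2
      · rw [if_neg (by simp)]
        cases hw
        · rw [if_neg (by simp)]
          rw [ih' false eg]
          by_cases hexs : ∃ u ∈ ts, pos u = q
          · rw [if_pos hexs, if_pos (hexc.mpr hexs)]
            simp
          · rw [if_neg hexs, if_neg (fun h => hexs (hexc.mp h))]
        · rw [if_pos rfl]
          rw [ih' true _]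
          by_cases hexs : ∃ u ∈ ts, pos u = q
          · rw [if_pos hexs, if_pos (hexc.mpr hexs), hkeep]
            simp
          · rw [if_neg hexs, if_neg (fun h => hexs (hexc.mp h)), hkeep]
      · rw [if_pos rfl]
        rw [ih' true _]
        by_cases hexs : ∃ u ∈ ts, pos u = q
        · rw [if_pos hexs, if_pos (hexc.mpr hexs), hkeep]
          simp
        · rw [if_neg hexs, if_neg (fun h => hexs (hexc.mp h)), hkeep]

theorem passUp_cell (G : List (List String)) (eg : List (List (List String)))
    (q : Int × Int) (hq1 : 0 ≤ q.1) (hq2 : 0 ≤ q.2) :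
    pvCell (pvPass G eg (0, (-1, 0))) q =
      if q.1 < (G.length : Int) ∧ q.2 < ((PySem.List.pyGetD G 0 []).length : Int) then
        pvUpd (pvCell eg q) 0
          ((PySem.List.pyRange 0 q.1 1).any (fun k => pvWall G k q.2) || pvWall G q.1 q.2)
      else pvCell eg q := by
  set h : Int := (G.length : Int) with hh
  set w : Int := ((PySem.List.pyGetD G 0 []).length : Int) with hw
  rw [passUp_eq]
  have hloc : ∀ eg, ∀ idx1 ∈ PySem.List.pyRange 0 w 1,
      pvCell (((PySem.List.pyRange 0 h 1).foldl
        (pvStep G 0 (fun t => (t, idx1))) (false, eg)).2) q =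
      if idx1 = q.2 ∧ q.1 < h then
        pvUpd (pvCell eg q) 0
          ((PySem.List.pyRange 0 q.1 1).any (fun k => pvWall G k q.2) || pvWall G q.1 q.2)
      else pvCell eg q := by
    intro eg idx1 hidx
    have hidx' := (PySem.List.mem_pyRange_one).mp hidx
    rw [sweep_cell G 0 (by omega) (fun t => (t, idx1)) q hq1 hq2
      (fun a b hab => by simpa using congrArg Prod.fst hab)
      (PySem.List.pyRange 0 h 1) (PySem.List.nodup_pyRange_one 0 h)
      (fun t ht => by
        have := (PySem.List.mem_pyRange_one).mp ht
        constructor <;> simp <;> omega)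
      false eg]
    have hiff : (∃ t ∈ PySem.List.pyRange 0 h 1, (t, idx1) = q) ↔ (idx1 = q.2 ∧ q.1 < h) := by
      simp only [PySem.List.mem_pyRange_one, Prod.ext_iff]
      constructor
      · rintro ⟨t, ⟨ht0, ht1⟩, rfl, rfl⟩; exact ⟨rfl, ht1⟩
      · rintro ⟨rfl, hlt⟩; exact ⟨q.1, ⟨hq1, hlt⟩, rfl, rfl⟩
    by_cases hc : idx1 = q.2 ∧ q.1 < h
    · rw [if_pos (hiff.mpr hc), if_pos hc]
      obtain ⟨rfl, hlt⟩ := hc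
      have hpred : (fun t => decide ((t, q.2) ≠ q)) = (fun t => decide (t ≠ q.1)) := by
        funext u
        simp [Prod.ext_iff]
      rw [hpred, takeWhile_pyRange_asc 0 h q.1 hq1 hlt, Bool.false_or]
      rfl
    · rw [if_neg (fun hex => hc (hiff.mp hex)), if_neg hc]
  rw [fold_lines_cell q q.2 (q.1 < h)
    ((PySem.List.pyRange 0 q.1 1).any (fun k => pvWall G k q.2) || pvWall G q.1 q.2) 0
    (PySem.List.pyRange 0 w 1) (PySem.List.nodup_pyRange_one 0 w) hloc eg]
  have hiff2 : (q.2 ∈ PySem.List.pyRange 0 w 1 ∧ q.1 < h) ↔ (q.1 < h ∧ q.2 < w) := by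
    simp only [PySem.List.mem_pyRange_one]
    constructor <;> intro hx <;> [exact ⟨hx.2, hx.1.2⟩; exact ⟨⟨hq2, hx.2⟩, hx.1⟩]
  by_cases hc : q.1 < h ∧ q.2 < w
  · rw [if_pos (hiff2.mpr hc), if_pos hc]
  · rw [if_neg (fun hx => hc (hiff2.mp hx)), if_neg hc]

theorem pyRange_neg_one_nodup (a b : Int) : (PySem.List.pyRange a b (-1)).Nodup := by
  rw [PySem.List.pyRange_neg_one_eq_reverse]
  exact List.nodup_reverse.mpr (PySem.List.nodup_pyRange_one _ _)

theorem passRight_cell (G : List (List String)) (eg : List (List (List String)))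
    (q : Int × Int) (hq1 : 0 ≤ q.1) (hq2 : 0 ≤ q.2) :
    pvCell (pvPass G eg (1, (0, 1))) q =
      if q.1 < (G.length : Int) ∧ q.2 < ((PySem.List.pyGetD G 0 []).length : Int) then
        pvUpd (pvCell eg q) 1
          ((PySem.List.pyRange (((PySem.List.pyGetD G 0 []).length : Int) - 1) q.2 (-1)).any
            (fun k => pvWall G q.1 k) || pvWall G q.1 q.2)
      else pvCell eg q := by
  set h : Int := (G.length : Int) with hh
  set w : Int := ((PySem.List.pyGetD G 0 []).length : Int) with hw
  rw [passRight_eq]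
  have hloc : ∀ eg, ∀ idx1 ∈ PySem.List.pyRange 0 h 1,
      pvCell (((PySem.List.pyRange (w - 1) (-1) (-1)).foldl
        (pvStep G 1 (fun t => (idx1, t))) (false, eg)).2) q =
      if idx1 = q.1 ∧ q.2 < w then
        pvUpd (pvCell eg q) 1
          ((PySem.List.pyRange (w - 1) q.2 (-1)).any (fun k => pvWall G q.1 k) || pvWall G q.1 q.2)
      else pvCell eg q := by
    intro eg idx1 hidx
    have hidx' := (PySem.List.mem_pyRange_one).mp hidx
    rw [sweep_cell G 1 (by omega) (fun t => (idx1, t)) q hq1 hq2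
      (fun a b hab => by simpa using congrArg Prod.snd hab)
      (PySem.List.pyRange (w - 1) (-1) (-1)) (pyRange_neg_one_nodup _ _)
      (fun t ht => by
        have := (PySem.List.mem_pyRange_neg_one).mp ht
        constructor <;> simp <;> omega)
      false eg]
    have hiff : (∃ t ∈ PySem.List.pyRange (w - 1) (-1) (-1), (idx1, t) = q) ↔
        (idx1 = q.1 ∧ q.2 < w) := by
      simp only [PySem.List.mem_pyRange_neg_one, Prod.ext_iff]
      constructor
      · rintro ⟨t, ⟨ht0, ht1⟩, rfl, rfl⟩; exact ⟨rfl, by omega⟩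
      · rintro ⟨rfl, hlt⟩; exact ⟨q.2, ⟨by omega, by omega⟩, rfl, rfl⟩
    by_cases hc : idx1 = q.1 ∧ q.2 < w
    · rw [if_pos (hiff.mpr hc), if_pos hc]
      obtain ⟨rfl, hlt⟩ := hc
      have hpred : (fun t => decide ((q.1, t) ≠ q)) = (fun t => decide (t ≠ q.2)) := by
        funext u
        simp [Prod.ext_iff]
      rw [hpred, takeWhile_pyRange_desc (w - 1) (-1) q.2 (by omega) (by omega), Bool.false_or]
      rfl
    · rw [if_neg (fun hex => hc (hiff.mp hex)), if_neg hc]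
  rw [fold_lines_cell q q.1 (q.2 < w)
    ((PySem.List.pyRange (w - 1) q.2 (-1)).any (fun k => pvWall G q.1 k) || pvWall G q.1 q.2) 1
    (PySem.List.pyRange 0 h 1) (PySem.List.nodup_pyRange_one 0 h) hloc eg]
  have hiff2 : (q.1 ∈ PySem.List.pyRange 0 h 1 ∧ q.2 < w) ↔ (q.1 < h ∧ q.2 < w) := by
    simp only [PySem.List.mem_pyRange_one]
    constructor <;> intro hx <;> [exact ⟨hx.1.2, hx.2⟩; exact ⟨⟨hq1, hx.1⟩, hx.2⟩]
  by_cases hc : q.1 < h ∧ q.2 < w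
  · rw [if_pos (hiff2.mpr hc), if_pos hc]
  · rw [if_neg (fun hx => hc (hiff2.mp hx)), if_neg hc]

theorem passDown_cell (G : List (List String)) (eg : List (List (List String)))
    (q : Int × Int) (hq1 : 0 ≤ q.1) (hq2 : 0 ≤ q.2) :
    pvCell (pvPass G eg (2, (1, 0))) q =
      if q.1 < (G.length : Int) ∧ q.2 < ((PySem.List.pyGetD G 0 []).length : Int) then
        pvUpd (pvCell eg q) 2
          ((PySem.List.pyRange ((G.length : Int) - 1) q.1 (-1)).any
            (fun k => pvWall G k q.2) || pvWall G q.1 q.2)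
      else pvCell eg q := by
  set h : Int := (G.length : Int) with hh
  set w : Int := ((PySem.List.pyGetD G 0 []).length : Int) with hw
  rw [passDown_eq]
  have hloc : ∀ eg, ∀ idx1 ∈ PySem.List.pyRange 0 w 1,
      pvCell (((PySem.List.pyRange (h - 1) (-1) (-1)).foldl
        (pvStep G 2 (fun t => (t, idx1))) (false, eg)).2) q =
      if idx1 = q.2 ∧ q.1 < h then
        pvUpd (pvCell eg q) 2
          ((PySem.List.pyRange (h - 1) q.1 (-1)).any (fun k => pvWall G k q.2) || pvWall G q.1 q.2)
      else pvCell eg q := by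
    intro eg idx1 hidx
    have hidx' := (PySem.List.mem_pyRange_one).mp hidx
    rw [sweep_cell G 2 (by omega) (fun t => (t, idx1)) q hq1 hq2
      (fun a b hab => by simpa using congrArg Prod.fst hab)
      (PySem.List.pyRange (h - 1) (-1) (-1)) (pyRange_neg_one_nodup _ _)
      (fun t ht => by
        have := (PySem.List.mem_pyRange_neg_one).mp ht
        constructor <;> simp <;> omega)
      false eg]
    have hiff : (∃ t ∈ PySem.List.pyRange (h - 1) (-1) (-1), (t, idx1) = q) ↔
        (idx1 = q.2 ∧ q.1 < h) := by
      simp only [PySem.List.mem_pyRange_neg_one, Prod.ext_iff]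
      constructor
      · rintro ⟨t, ⟨ht0, ht1⟩, rfl, rfl⟩; exact ⟨rfl, by omega⟩
      · rintro ⟨rfl, hlt⟩; exact ⟨q.1, ⟨by omega, by omega⟩, rfl, rfl⟩
    by_cases hc : idx1 = q.2 ∧ q.1 < h
    · rw [if_pos (hiff.mpr hc), if_pos hc]
      obtain ⟨rfl, hlt⟩ := hc
      have hpred : (fun t => decide ((t, q.2) ≠ q)) = (fun t => decide (t ≠ q.1)) := by
        funext u
        simp [Prod.ext_iff]
      rw [hpred, takeWhile_pyRange_desc (h - 1) (-1) q.1 (by omega) (by omega), Bool.false_or]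
      rfl
    · rw [if_neg (fun hex => hc (hiff.mp hex)), if_neg hc]
  rw [fold_lines_cell q q.2 (q.1 < h)
    ((PySem.List.pyRange (h - 1) q.1 (-1)).any (fun k => pvWall G k q.2) || pvWall G q.1 q.2) 2
    (PySem.List.pyRange 0 w 1) (PySem.List.nodup_pyRange_one 0 w) hloc eg]
  have hiff2 : (q.2 ∈ PySem.List.pyRange 0 w 1 ∧ q.1 < h) ↔ (q.1 < h ∧ q.2 < w) := by
    simp only [PySem.List.mem_pyRange_one]
    constructor <;> intro hx <;> [exact ⟨hx.2, hx.1.2⟩; exact ⟨⟨hq2, hx.2⟩, hx.1⟩]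
  by_cases hc : q.1 < h ∧ q.2 < w
  · rw [if_pos (hiff2.mpr hc), if_pos hc]
  · rw [if_neg (fun hx => hc (hiff2.mp hx)), if_neg hc]

theorem passLeft_cell (G : List (List String)) (eg : List (List (List String)))
    (q : Int × Int) (hq1 : 0 ≤ q.1) (hq2 : 0 ≤ q.2) :
    pvCell (pvPass G eg (3, (0, -1))) q =
      if q.1 < (G.length : Int) ∧ q.2 < ((PySem.List.pyGetD G 0 []).length : Int) then
        pvUpd (pvCell eg q) 3
          ((PySem.List.pyRange 0 q.2 1).any (fun k => pvWall G q.1 k) || pvWall G q.1 q.2)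
      else pvCell eg q := by
  set h : Int := (G.length : Int) with hh
  set w : Int := ((PySem.List.pyGetD G 0 []).length : Int) with hw
  rw [passLeft_eq]
  have hloc : ∀ eg, ∀ idx1 ∈ PySem.List.pyRange (h - 1) (-1) (-1),
      pvCell (((PySem.List.pyRange 0 w 1).foldl
        (pvStep G 3 (fun t => (idx1, t))) (false, eg)).2) q =
      if idx1 = q.1 ∧ q.2 < w then
        pvUpd (pvCell eg q) 3
          ((PySem.List.pyRange 0 q.2 1).any (fun k => pvWall G q.1 k) || pvWall G q.1 q.2)
      else pvCell eg q := by
    intro eg idx1 hidx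
    have hidx' := (PySem.List.mem_pyRange_neg_one).mp hidx
    rw [sweep_cell G 3 (by omega) (fun t => (idx1, t)) q hq1 hq2
      (fun a b hab => by simpa using congrArg Prod.snd hab)
      (PySem.List.pyRange 0 w 1) (PySem.List.nodup_pyRange_one 0 w)
      (fun t ht => by
        have := (PySem.List.mem_pyRange_one).mp ht
        constructor <;> simp <;> omega)
      false eg]
    have hiff : (∃ t ∈ PySem.List.pyRange 0 w 1, (idx1, t) = q) ↔
        (idx1 = q.1 ∧ q.2 < w) := by
      simp only [PySem.List.mem_pyRange_one, Prod.ext_iff]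
      constructor
      · rintro ⟨t, ⟨ht0, ht1⟩, rfl, rfl⟩; exact ⟨rfl, ht1⟩
      · rintro ⟨rfl, hlt⟩; exact ⟨q.2, ⟨hq2, hlt⟩, rfl, rfl⟩
    by_cases hc : idx1 = q.1 ∧ q.2 < w
    · rw [if_pos (hiff.mpr hc), if_pos hc]
      obtain ⟨rfl, hlt⟩ := hc
      have hpred : (fun t => decide ((q.1, t) ≠ q)) = (fun t => decide (t ≠ q.2)) := by
        funext u
        simp [Prod.ext_iff]
      rw [hpred, takeWhile_pyRange_asc 0 w q.2 hq2 hlt, Bool.false_or]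
      rfl
    · rw [if_neg (fun hex => hc (hiff.mp hex)), if_neg hc]
  rw [fold_lines_cell q q.1 (q.2 < w)
    ((PySem.List.pyRange 0 q.2 1).any (fun k => pvWall G q.1 k) || pvWall G q.1 q.2) 3
    (PySem.List.pyRange (h - 1) (-1) (-1)) (pyRange_neg_one_nodup _ _) hloc eg]
  have hiff2 : (q.1 ∈ PySem.List.pyRange (h - 1) (-1) (-1) ∧ q.2 < w) ↔ (q.1 < h ∧ q.2 < w) := by
    simp only [PySem.List.mem_pyRange_neg_one]
    constructor <;> intro hx <;> [exact ⟨by omega, hx.2⟩; exact ⟨⟨by omega, by omega⟩, hx.2⟩]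
  by_cases hc : q.1 < h ∧ q.2 < w
  · rw [if_pos (hiff2.mpr hc), if_pos hc]
  · rw [if_neg (fun hx => hc (hiff2.mp hx)), if_neg hc]

theorem pvInit_inner (row : List String) :
    ∀ (acc : List (List (List String))) (r : List (List String)),
    row.foldl (fun eg _cell =>
      eg.dropLast ++ [eg.getLastD [] ++ [["Y", "Y", "Y", "Y"]]]) (acc ++ [r]) =
      acc ++ [r ++ row.map (fun _ => ["Y", "Y", "Y", "Y"])] := by
  induction row with
  | nil => intro acc r; simp
  | cons x xs ih =>
    intro acc r
    simp only [List.foldl_cons]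
    rw [List.dropLast_concat, List.getLastD_concat]
    rw [ih acc (r ++ [["Y", "Y", "Y", "Y"]])]
    simp

theorem pvInitA_eq (G : List (List String)) :
    pvInitA G = G.map (fun row => row.map (fun _ => ["Y", "Y", "Y", "Y"])) := by
  suffices h : ∀ acc, G.foldl (fun eg row =>
      row.foldl (fun eg _cell =>
        eg.dropLast ++ [eg.getLastD [] ++ [["Y", "Y", "Y", "Y"]]]) (eg ++ [[]])) acc =
      acc ++ G.map (fun row => row.map (fun _ => ["Y", "Y", "Y", "Y"])) by
    have := h []
    simpa [pvInitA] using this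
  induction G with
  | nil => intro acc; simp
  | cons row rows ih =>
    intro acc
    simp only [List.foldl_cons, List.map_cons]
    rw [pvInit_inner row acc [], ih]
    simp

theorem shape_set3' (eg : List (List (List String))) (i j d : Int) (v : String)
    (hi : 0 ≤ i) (hj : 0 ≤ j) :
    (pvSet3 eg i j d v).map List.length = eg.map List.length := by
  unfold pvSet3
  obtain ⟨a, rfl⟩ := Int.eq_ofNat_of_zero_le hi
  simp only [PySem.List.pySetD_natCast, PySem.List.pyGetD_natCast]
  rw [List.map_set]
  rcases Nat.lt_or_ge a eg.length with h | h
  · rw [PySem.List.length_pySetD]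
    have h2 : (eg.getD a []).length = (eg.map List.length).getD a 0 := by
      simp [List.getD_eq_getElem?_getD, h]
    rw [List.getD_eq_getElem (eg.map List.length) 0 (by simpa using h)] at h2
    rw [h2, List.set_getElem_self]
  · rw [List.set_eq_of_length_le (by simpa using h)]

theorem shape_sweep (G : List (List String)) (d : Int) (pos : Int → Int × Int) :
    ∀ (ts : List Int), (∀ t ∈ ts, 0 ≤ (pos t).1 ∧ 0 ≤ (pos t).2) →
      ∀ (st : Bool × List (List (List String))),
      ((ts.foldl (pvStep G d pos) st).2).map List.length = (st.2).map List.length := by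
  intro ts
  induction ts with
  | nil => intro _ st; rfl
  | cons t ts ih =>
    intro hpos st
    have hpt := hpos t (List.mem_cons_self)
    simp only [List.foldl_cons, pvStep_eq]
    rw [ih (fun u hu => hpos u (List.mem_cons_of_mem t hu))]
    by_cases hb : pvWall G (pos t).1 (pos t).2
    · rw [if_pos hb]
      exact shape_set3' _ _ _ _ _ hpt.1 hpt.2
    · rw [if_neg hb]
      by_cases hw : st.1
      · rw [if_pos hw]
        exact shape_set3' _ _ _ _ _ hpt.1 hpt.2
      · rw [if_neg hw]

theorem foldl_shape {f : List (List (List String)) → Int → List (List (List String))} :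
    ∀ (L : List Int),
      (∀ eg, ∀ t ∈ L, (f eg t).map List.length = eg.map List.length) →
      ∀ eg, ((L.foldl f eg).map List.length) = eg.map List.length := by
  intro L
  induction L with
  | nil => intro _ eg; rfl
  | cons x L ih =>
    intro hf eg
    simp only [List.foldl_cons]
    rw [ih (fun eg t ht => hf eg t (List.mem_cons_of_mem x ht)) (f eg x),
      hf eg x (List.mem_cons_self)]

theorem shape_calc (G : List (List String)) :
    (calculate_escape_grid G).map List.length = G.map List.length := by
  rw [calc_unfold]
  rw [passLeft_eq, foldl_shape _ (fun eg t ht =>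
    shape_sweep G 3 _ _ (fun u hu => by
      have h1 := (PySem.List.mem_pyRange_neg_one).mp ht
      have h2 := (PySem.List.mem_pyRange_one).mp hu
      constructor <;> simp <;> omega) (false, eg))]
  rw [passDown_eq, foldl_shape _ (fun eg t ht =>
    shape_sweep G 2 _ _ (fun u hu => by
      have h1 := (PySem.List.mem_pyRange_one).mp ht
      have h2 := (PySem.List.mem_pyRange_neg_one).mp hu
      constructor <;> simp <;> omega) (false, eg))]
  rw [passRight_eq, foldl_shape _ (fun eg t ht =>
    shape_sweep G 1 _ _ (fun u hu => by
      have h1 := (PySem.List.mem_pyRange_one).mp ht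
      have h2 := (PySem.List.mem_pyRange_neg_one).mp hu
      constructor <;> simp <;> omega) (false, eg))]
  rw [passUp_eq, foldl_shape _ (fun eg t ht =>
    shape_sweep G 0 _ _ (fun u hu => by
      have h1 := (PySem.List.mem_pyRange_one).mp ht
      have h2 := (PySem.List.mem_pyRange_one).mp hu
      constructor <;> simp <;> omega) (false, eg))]
  rw [pvInitA_eq]
  simp

theorem blockedUp_eq (G : List (List String)) (h w i j : Int) (hi : 0 ≤ i) :
    ((PySem.List.pyRange 0 i 1).any (fun k => pvWall G k j) || pvWall G i j) =
      pvBlocked G h w i j (-1) 0 := by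
  unfold pvBlocked
  rw [if_pos (by norm_num : (-1 : Int) < 0)]
  rw [Bool.eq_iff_iff]
  simp only [Bool.or_eq_true, List.any_eq_true, PySem.List.mem_pyRange_one, PySem.List.mem_pyRange_neg_one]
  constructor
  · rintro (⟨k, ⟨hk0, hk1⟩, hk⟩ | hk)
    · exact ⟨i - k, ⟨by omega, by omega⟩, by rw [show i + (i - k) * (-1) = k by ring, show j + (i - k) * 0 = j by ring]; exact hk⟩
    · exact ⟨0, ⟨by omega, by omega⟩, by rw [show i + 0 * (-1) = i by ring, show j + 0 * 0 = j by ring]; exact hk⟩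
  · rintro ⟨k, ⟨hk0, hk1⟩, hk⟩
    rw [show i + k * (-1) = i - k by ring, show j + k * 0 = j by ring] at hk
    by_cases hk' : k = 0
    · right; rw [hk', show i - (0:Int) = i by ring] at hk; exact hk
    · left; exact ⟨i - k, ⟨by omega, by omega⟩, hk⟩

theorem blockedRight_eq (G : List (List String)) (h w i j : Int) (hj : 0 ≤ j) (hjw : j < w) :
    ((PySem.List.pyRange (w - 1) j (-1)).any (fun k => pvWall G i k) || pvWall G i j) =
      pvBlocked G h w i j 0 1 := by
  unfold pvBlocked
  rw [if_neg (by norm_num), if_neg (by norm_num), if_neg (by norm_num)]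
  rw [Bool.eq_iff_iff]
  simp only [Bool.or_eq_true, List.any_eq_true, PySem.List.mem_pyRange_one, PySem.List.mem_pyRange_neg_one]
  constructor
  · rintro (⟨k, ⟨hk0, hk1⟩, hk⟩ | hk)
    · exact ⟨k - j, ⟨by omega, by omega⟩, by rw [show i + (k - j) * 0 = i by ring, show j + (k - j) * 1 = k by ring]; exact hk⟩
    · exact ⟨0, ⟨by omega, by omega⟩, by rw [show i + 0 * 0 = i by ring, show j + 0 * 1 = j by ring]; exact hk⟩
  · rintro ⟨k, ⟨hk0, hk1⟩, hk⟩
    rw [show i + k * 0 = i by ring, show j + k * 1 = j + k by ring] at hk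
    by_cases hk' : k = 0
    · right; rw [hk', show j + (0:Int) = j by ring] at hk; exact hk
    · left; exact ⟨j + k, ⟨by omega, by omega⟩, hk⟩

theorem blockedDown_eq (G : List (List String)) (h w i j : Int) (hi : 0 ≤ i) (hih : i < h) :
    ((PySem.List.pyRange (h - 1) i (-1)).any (fun k => pvWall G k j) || pvWall G i j) =
      pvBlocked G h w i j 1 0 := by
  unfold pvBlocked
  rw [if_neg (by norm_num), if_pos (by norm_num : (0 : Int) < 1)]
  rw [Bool.eq_iff_iff]
  simp only [Bool.or_eq_true, List.any_eq_true, PySem.List.mem_pyRange_one, PySem.List.mem_pyRange_neg_one]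
  constructor
  · rintro (⟨k, ⟨hk0, hk1⟩, hk⟩ | hk)
    · exact ⟨k - i, ⟨by omega, by omega⟩, by rw [show i + (k - i) * 1 = k by ring, show j + (k - i) * 0 = j by ring]; exact hk⟩
    · exact ⟨0, ⟨by omega, by omega⟩, by rw [show i + 0 * 1 = i by ring, show j + 0 * 0 = j by ring]; exact hk⟩
  · rintro ⟨k, ⟨hk0, hk1⟩, hk⟩
    rw [show i + k * 1 = i + k by ring, show j + k * 0 = j by ring] at hk
    by_cases hk' : k = 0
    · right; rw [hk', show i + (0:Int) = i by ring] at hk; exact hk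
    · left; exact ⟨i + k, ⟨by omega, by omega⟩, hk⟩

theorem blockedLeft_eq (G : List (List String)) (h w i j : Int) (hj : 0 ≤ j) :
    ((PySem.List.pyRange 0 j 1).any (fun k => pvWall G i k) || pvWall G i j) =
      pvBlocked G h w i j 0 (-1) := by
  unfold pvBlocked
  rw [if_neg (by norm_num), if_neg (by norm_num), if_pos (by norm_num : (-1 : Int) < 0)]
  rw [Bool.eq_iff_iff]
  simp only [Bool.or_eq_true, List.any_eq_true, PySem.List.mem_pyRange_one, PySem.List.mem_pyRange_neg_one]
  constructor
  · rintro (⟨k, ⟨hk0, hk1⟩, hk⟩ | hk)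
    · exact ⟨j - k, ⟨by omega, by omega⟩, by rw [show i + (j - k) * 0 = i by ring, show j + (j - k) * (-1) = k by ring]; exact hk⟩
    · exact ⟨0, ⟨by omega, by omega⟩, by rw [show i + 0 * 0 = i by ring, show j + 0 * (-1) = j by ring]; exact hk⟩
  · rintro ⟨k, ⟨hk0, hk1⟩, hk⟩
    rw [show i + k * 0 = i by ring, show j + k * (-1) = j - k by ring] at hk
    by_cases hk' : k = 0
    · right; rw [hk', show j - (0:Int) = j by ring] at hk; exact hk
    · left; exact ⟨j - k, ⟨by omega, by omega⟩, hk⟩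

theorem getElem_eq_pvCell (eg : List (List (List String))) (i j : Nat)
    (hi : i < eg.length) (hj : j < eg[i].length) :
    eg[i][j] = pvCell eg ((i : Int), (j : Int)) := by
  simp only [pvCell, PySem.List.pyGetD_natCast]
  rw [List.getD_eq_getElem eg [] hi, List.getD_eq_getElem _ [] hj]

-- B-side helpers for the proofs: the inner per-cell direction loop of the alt port
def pvRay (G : List (List String)) (h w : Int) (esc : List (List (List String))) (i j : Int) :
    List (List (List String)) :=
  (PySem.List.enumerate pvDirList 0).foldl (fun esc de =>
    if pvBlocked G h w i j de.2.1 de.2.2 then pvSet3 esc i j de.1 "N" else esc) esc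

def pvInitMap (G : List (List String)) : List (List (List String)) :=
  G.map (fun row => row.map (fun _cell => ["Y", "Y", "Y", "Y"]))

-- the effect of the four-direction ray scan on one cell, as a function of the old cell
def pvF (G : List (List String)) (h w : Int) (q : Int × Int) (c : List String) : List String :=
  pvUpd (pvUpd (pvUpd (pvUpd c 0 (pvBlocked G h w q.1 q.2 (-1) 0))
    1 (pvBlocked G h w q.1 q.2 0 1)) 2 (pvBlocked G h w q.1 q.2 1 0))
    3 (pvBlocked G h w q.1 q.2 0 (-1))

theorem alt_unfold (G : List (List String)) :
    calculate_escape_grid_alt G =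
      (PySem.List.pyRange 0 (G.length : Int) 1).foldl (fun esc i =>
        (PySem.List.pyRange 0 ((PySem.List.pyGetD G 0 []).length : Int) 1).foldl
          (fun esc j => pvRay G (G.length : Int) ((PySem.List.pyGetD G 0 []).length : Int) esc i j)
          esc) (pvInitMap G) := rfl

theorem fold_point {eff : List (List (List String)) → Int → List (List (List String))}
    (q : Int × Int) (lq : Int) (inR : Prop) [Decidable inR] (F : List String → List String) :
    ∀ (L : List Int), L.Nodup →
    (∀ esc, ∀ t ∈ L, pvCell (eff esc t) q =
      if t = lq ∧ inR then F (pvCell esc q) else pvCell esc q) →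
    ∀ esc, pvCell (L.foldl eff esc) q =
      if lq ∈ L ∧ inR then F (pvCell esc q) else pvCell esc q := by
  intro L
  induction L with
  | nil => intro _ _ esc; simp
  | cons x L ih =>
    intro hnd hloc esc
    simp only [List.foldl_cons]
    rw [ih hnd.of_cons (fun esc t ht => hloc esc t (List.mem_cons_of_mem x ht))]
    rw [hloc esc x (List.mem_cons_self ..)]
    by_cases hx : x = lq ∧ inR
    · have hnotin : lq ∉ L := hx.1 ▸ (List.nodup_cons.mp hnd).1
      rw [if_pos hx, if_neg (fun h => hnotin h.1),
        if_pos ⟨by rw [← hx.1]; exact List.mem_cons_self .., hx.2⟩]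
    · rw [if_neg hx]
      by_cases hL : lq ∈ L ∧ inR
      · rw [if_pos hL, if_pos ⟨List.mem_cons_of_mem x hL.1, hL.2⟩]
      · rw [if_neg hL, if_neg]
        intro h
        rcases List.mem_cons.mp h.1 with h1 | h1
        · exact hx ⟨h1.symm, h.2⟩
        · exact hL ⟨h1, h.2⟩

theorem step_cell (esc : List (List (List String))) (i j d : Int) (b : Bool)
    (hi : 0 ≤ i) (hj : 0 ≤ j) (hd : 0 ≤ d) (q : Int × Int) (hq1 : 0 ≤ q.1) (hq2 : 0 ≤ q.2) :
    pvCell (if b then pvSet3 esc i j d "N" else esc) q =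
      if q = (i, j) then pvUpd (pvCell esc q) d.toNat b else pvCell esc q := by
  cases b
  · simp [pvUpd]
  · simp only [if_pos trivial]
    rw [pvCell_set3 esc i j d "N" hi hj hd q hq1 hq2]
    by_cases hq : q = (i, j) <;> simp [hq, pvUpd]

theorem ray_cell (G : List (List String)) (h w i j : Int) (hi : 0 ≤ i) (hj : 0 ≤ j)
    (q : Int × Int) (hq1 : 0 ≤ q.1) (hq2 : 0 ≤ q.2) (esc : List (List (List String))) :
    pvCell (pvRay G h w esc i j) q =
      if q = (i, j) then pvF G h w (i, j) (pvCell esc q) else pvCell esc q := by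
  have henum : PySem.List.enumerate pvDirList 0 =
      [((0 : Int), ((-1 : Int), (0 : Int))), ((1 : Int), ((0 : Int), (1 : Int))),
       ((2 : Int), ((1 : Int), (0 : Int))), ((3 : Int), ((0 : Int), (-1 : Int)))] := by decide
  rw [pvRay, henum]
  simp only [List.foldl_cons, List.foldl_nil]
  rw [step_cell _ i j 3 _ hi hj (by omega) q hq1 hq2,
    step_cell _ i j 2 _ hi hj (by omega) q hq1 hq2,
    step_cell _ i j 1 _ hi hj (by omega) q hq1 hq2,
    step_cell _ i j 0 _ hi hj (by omega) q hq1 hq2]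
  by_cases hq : q = (i, j) <;> simp [hq, pvF]

theorem row_fold_cell (G : List (List String)) (h w i : Int) (hi : 0 ≤ i)
    (q : Int × Int) (hq1 : 0 ≤ q.1) (hq2 : 0 ≤ q.2) (esc : List (List (List String))) :
    pvCell ((PySem.List.pyRange 0 w 1).foldl (fun esc j => pvRay G h w esc i j) esc) q =
      if q.2 ∈ PySem.List.pyRange 0 w 1 ∧ i = q.1 then pvF G h w q (pvCell esc q)
      else pvCell esc q := by
  refine fold_point q q.2 (i = q.1) (pvF G h w q) (PySem.List.pyRange 0 w 1)
    (PySem.List.nodup_pyRange_one 0 w) ?_ esc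
  intro esc t ht
  have ht' := (PySem.List.mem_pyRange_one).mp ht
  rw [ray_cell G h w i t hi (by omega) q hq1 hq2 esc]
  by_cases hc : t = q.2 ∧ i = q.1
  · have hq : q = (i, t) := by
      obtain ⟨h1, h2⟩ := hc
      exact Prod.ext_iff.mpr ⟨h2.symm, h1.symm⟩
    rw [if_pos hq, if_pos hc, hq]
  · rw [if_neg hc, if_neg (by rintro rfl; exact hc ⟨rfl, rfl⟩)]

theorem alt_cell (G : List (List String)) (q : Int × Int) (hq1 : 0 ≤ q.1) (hq2 : 0 ≤ q.2) :
    pvCell (calculate_escape_grid_alt G) q =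
      if q.1 < (G.length : Int) ∧ q.2 < ((PySem.List.pyGetD G 0 []).length : Int) then
        pvF G (G.length : Int) ((PySem.List.pyGetD G 0 []).length : Int) q
          (pvCell (pvInitMap G) q)
      else pvCell (pvInitMap G) q := by
  set h : Int := (G.length : Int) with hh
  set w : Int := ((PySem.List.pyGetD G 0 []).length : Int) with hw
  rw [alt_unfold]
  rw [fold_point q q.1 (q.2 ∈ PySem.List.pyRange 0 w 1) (pvF G h w q)
    (PySem.List.pyRange 0 h 1) (PySem.List.nodup_pyRange_one 0 h)
    (fun esc t ht => by
      have ht' := (PySem.List.mem_pyRange_one).mp ht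
      rw [row_fold_cell G h w t (by omega) q hq1 hq2 esc]
      by_cases hc : t = q.1 ∧ q.2 ∈ PySem.List.pyRange 0 w 1
      · rw [if_pos ⟨hc.2, hc.1⟩, if_pos hc]
      · rw [if_neg (fun hx => hc ⟨hx.2, hx.1⟩), if_neg hc])
    (pvInitMap G)]
  have hiff : (q.1 ∈ PySem.List.pyRange 0 h 1 ∧ q.2 ∈ PySem.List.pyRange 0 w 1) ↔
      (q.1 < h ∧ q.2 < w) := by
    simp only [PySem.List.mem_pyRange_one]
    constructor
    · rintro ⟨⟨_, h1⟩, ⟨_, h2⟩⟩; exact ⟨h1, h2⟩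
    · rintro ⟨h1, h2⟩; exact ⟨⟨hq1, h1⟩, ⟨hq2, h2⟩⟩
  by_cases hc : q.1 < h ∧ q.2 < w
  · rw [if_pos (hiff.mpr hc), if_pos hc]
  · rw [if_neg (fun hx => hc (hiff.mp hx)), if_neg hc]

theorem shape_ray (G : List (List String)) (h w i j : Int) (hi : 0 ≤ i) (hj : 0 ≤ j)
    (esc : List (List (List String))) :
    (pvRay G h w esc i j).map List.length = esc.map List.length := by
  have hs : ∀ (esc : List (List (List String))) (d : Int) (b : Bool), 0 ≤ d →
      ((if b then pvSet3 esc i j d "N" else esc).map List.length) = esc.map List.length := by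
    intro esc d b _
    cases b
    · rfl
    · exact shape_set3' esc i j d "N" hi hj
  have henum : PySem.List.enumerate pvDirList 0 =
      [((0 : Int), ((-1 : Int), (0 : Int))), ((1 : Int), ((0 : Int), (1 : Int))),
       ((2 : Int), ((1 : Int), (0 : Int))), ((3 : Int), ((0 : Int), (-1 : Int)))] := by decide
  rw [pvRay, henum]
  simp only [List.foldl_cons, List.foldl_nil]
  rw [hs _ 3 _ (by omega), hs _ 2 _ (by omega), hs _ 1 _ (by omega), hs _ 0 _ (by omega)]

theorem shape_alt (G : List (List String)) :
    (calculate_escape_grid_alt G).map List.length = G.map List.length := by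
  rw [alt_unfold]
  rw [foldl_shape _ (fun esc t ht =>
    foldl_shape _ (fun esc u hu =>
      shape_ray G _ _ t u
        (((PySem.List.mem_pyRange_one).mp ht).1)
        (((PySem.List.mem_pyRange_one).mp hu).1) esc) esc)]
  simp [pvInitMap]

theorem initmap_cell (G : List (List String)) (i j : Nat)
    (hi : i < G.length) (hj : j < G[i].length) :
    pvCell (pvInitMap G) ((i : Int), (j : Int)) = ["Y", "Y", "Y", "Y"] := by
  simp only [pvInitMap, pvCell, PySem.List.pyGetD_natCast]
  rw [List.getD_eq_getElem _ [] (show i < (G.map (fun row => row.map (fun _cell => (["Y", "Y", "Y", "Y"] : List String)))).length by simpa using hi)]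
  rw [List.getElem_map]
  rw [List.getD_eq_getElem _ [] (show j < (G[i].map (fun _cell => (["Y", "Y", "Y", "Y"] : List String))).length by simpa using hj)]
  rw [List.getElem_map]

theorem init_cell (G : List (List String)) (i j : Nat)
    (hi : i < G.length) (hj : j < G[i].length) :
    pvCell (pvInitA G) ((i : Int), (j : Int)) = ["Y", "Y", "Y", "Y"] := by
  rw [pvInitA_eq]
  exact initmap_cell G i j hi hj

theorem calc_eq_alt (G : List (List String)) :
    calculate_escape_grid G = calculate_escape_grid_alt G := by
  have hshapeA := shape_calc G
  have hshapeB := shape_alt G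
  have hlenA : (calculate_escape_grid G).length = G.length := by
    simpa using congrArg List.length hshapeA
  have hlenB : (calculate_escape_grid_alt G).length = G.length := by
    simpa using congrArg List.length hshapeB
  have hrowA : ∀ (i : Nat) (h1 : i < (calculate_escape_grid G).length) (h2 : i < G.length),
      (calculate_escape_grid G)[i].length = G[i].length := by
    intro i h1 h2
    have h3 := congrArg (fun l => l[i]?) hshapeA
    simp only [List.getElem?_map] at h3
    rw [List.getElem?_eq_getElem h1, List.getElem?_eq_getElem h2] at h3
    simpa using h3
  have hrowB : ∀ (i : Nat) (h1 : i < (calculate_escape_grid_alt G).length) (h2 : i < G.length),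
      (calculate_escape_grid_alt G)[i].length = G[i].length := by
    intro i h1 h2
    have h3 := congrArg (fun l => l[i]?) hshapeB
    simp only [List.getElem?_map] at h3
    rw [List.getElem?_eq_getElem h1, List.getElem?_eq_getElem h2] at h3
    simpa using h3
  apply List.ext_getElem (by rw [hlenA, hlenB])
  intro i hi1 hi2
  have hiG : i < G.length := by rwa [hlenA] at hi1
  apply List.ext_getElem (by rw [hrowA i hi1 hiG, hrowB i hi2 hiG])
  intro j hj1 hj2
  have hjG : j < G[i].length := by rwa [hrowA i hi1 hiG] at hj1
  rw [getElem_eq_pvCell _ i j hi1 hj1, getElem_eq_pvCell _ i j hi2 hj2]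
  rw [alt_cell G ((i : Int), (j : Int)) (by positivity) (by positivity)]
  rw [calc_unfold]
  rw [passLeft_cell G _ ((i : Int), (j : Int)) (by positivity) (by positivity)]
  rw [passDown_cell G _ ((i : Int), (j : Int)) (by positivity) (by positivity)]
  rw [passRight_cell G _ ((i : Int), (j : Int)) (by positivity) (by positivity)]
  rw [passUp_cell G _ ((i : Int), (j : Int)) (by positivity) (by positivity)]
  rw [init_cell G i j hiG hjG, initmap_cell G i j hiG hjG]
  have hih : ((i : Nat) : Int) < (G.length : Int) := by exact_mod_cast hiG
  by_cases hjw : ((j : Nat) : Int) < ((PySem.List.pyGetD G 0 []).length : Int)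
  · rw [if_pos ⟨hih, hjw⟩, if_pos ⟨hih, hjw⟩, if_pos ⟨hih, hjw⟩, if_pos ⟨hih, hjw⟩,
      if_pos ⟨hih, hjw⟩]
    simp only [pvF]
    rw [blockedUp_eq G (G.length : Int) _ _ _ (by positivity),
      blockedRight_eq G (G.length : Int) _ _ _ (by positivity) hjw,
      blockedDown_eq G _ _ _ _ (by positivity) hih,
      blockedLeft_eq G (G.length : Int) _ _ _ (by positivity)]
  · rw [if_neg (fun hx => hjw hx.2), if_neg (fun hx => hjw hx.2), if_neg (fun hx => hjw hx.2),
      if_neg (fun hx => hjw hx.2), if_neg (fun hx => hjw hx.2)]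

-- ===== VERDICT (by name: the statement is the Claim_ definition above) =====
theorem calculate_escape_grid_spec : Claim_equal_calculate_escape_grid := by
  intro input_grid _ _
  unfold Spec_calculate_escape_grid
  exact calc_eq_alt input_grid
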